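-- pv_equiv track=rewrite | github.com/QuantumBrainBits/Genotyping_Tandem_Repeats | Generating_Cigar_string.py | Generate_cigar
-- ===== SOURCE A (Python) =====
-- def Generate_cigar(reference_seq, query_seq):
--
--     # Extract CIGAR string from the first alignment
--     query_lindex  = len(query_seq) - len(query_seq.lstrip('-')) # query indexs helps us to remove "leading spaces" & "trailing spaces"
--     query_rindex  = len(query_seq) - len(query_seq.rstrip('-'))
--
--
--     # appending the cigar ops in order.
--     cigar_ops = []
--
--     for pos in range(0+query_lindex, len(query_seq)-query_rindex):
--
--         # refn and query seq each base to check its type.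
--         rbase = reference_seq[pos]
--         qbase = query_seq[pos]
--
--         # checking "Macthes": represents "M"
--         if rbase == qbase :
--             cigar_ops.append('M')
--
--         # checking "Insertion": "I"
--         elif rbase == '-':
--             cigar_ops.append('I')
--
--         # checking "Deletion": "D"
--         elif qbase == '-':
--             cigar_ops.append('D')
--
--         # checking "Sub": "X"
--         elif rbase != qbase:
--             cigar_ops.append('X')
--
--
--     # list cigar ops into joint cigar string.
--     cigar_ops_values = {'M':0, 'I':0, 'D':0, 'X':0}
--     cigar_type     = []
--     cigar_num      = []
--
--     current_ops = cigar_ops[0]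
--     for i,ops in enumerate(cigar_ops):
--
--         # keeps adding the type ops onl if consicutive.
--         if ops == current_ops:
--             cigar_ops_values[ops] += 1
--
--         else: # here we realised order is changed with new ops.
--             cigar_type.append(current_ops) # append the current info
--             cigar_num.append(cigar_ops_values[current_ops])
--             cigar_ops_values.update({}.fromkeys(cigar_ops_values,0)) # its necessary to keep the track of cigar ops so we clear dict so we only update order wise.
--             cigar_ops_values[ops] += 1
--             current_ops = ops
--
--         if ops == current_ops and len(cigar_ops)-1 == int(i):
--             cigar_type.append(current_ops)
--             cigar_num.append(cigar_ops_values[current_ops])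
--
--
--     # return the cigar_type and cigar_num bases.
--     query_seq1 = query_seq[0+query_lindex : len(query_seq)-query_rindex]
--     return [cigar_type, cigar_num, query_seq1]
-- ===== SOURCE B (Python) =====
-- def Generate_cigar(reference_seq, query_seq):
--     n = len(query_seq)
--     lo = n - len(query_seq.lstrip('-'))
--     hi = n - (n - len(query_seq.rstrip('-')))
--
--     def op(i):
--         r, q = reference_seq[i], query_seq[i]
--         return 'M' if r == q else 'I' if r == '-' else 'D' if q == '-' else 'X'
--
--     # change-point decomposition: indices where a new run starts, plus the window end;
--     # run labels are the op at each cut, run lengths are differences of adjacent cuts.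
--     cuts = [i for i in range(lo, hi) if i == lo or op(i) != op(i - 1)] + [hi]
--     pairs = list(zip(cuts, cuts[1:]))
--     cigar_type = [op(a) for a, _ in pairs]
--     cigar_num = [b - a for a, b in pairs]
--     return [cigar_type, cigar_num, query_seq[lo:hi]]
-- ===== Notes on version B (the rewrite author's own statement) =====
-- stated objective: alternative
-- what changed: A counts run lengths sequentially with a hand-maintained counter dict reset on each run change plus a last-index special case; B instead computes the change-point indices of the window (positions where the op differs from its predecessor), reads run labels at those cuts and obtains run lengths as differences of adjacent cut indices, never building the op list or any counter.
import Mathlib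
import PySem

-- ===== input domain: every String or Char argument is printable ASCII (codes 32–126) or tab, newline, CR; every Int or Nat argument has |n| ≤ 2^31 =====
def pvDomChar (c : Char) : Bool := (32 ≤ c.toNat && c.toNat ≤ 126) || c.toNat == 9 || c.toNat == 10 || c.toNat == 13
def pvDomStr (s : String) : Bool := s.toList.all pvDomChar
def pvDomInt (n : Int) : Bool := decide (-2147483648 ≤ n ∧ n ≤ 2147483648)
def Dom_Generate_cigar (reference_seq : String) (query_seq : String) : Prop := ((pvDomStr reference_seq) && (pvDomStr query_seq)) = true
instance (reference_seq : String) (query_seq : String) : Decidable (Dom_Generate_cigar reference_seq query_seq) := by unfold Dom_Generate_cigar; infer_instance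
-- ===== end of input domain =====

-- B replaces A's sequential counter-dict run-length loop by a change-point computation:
-- the cut indices where the op differs from its predecessor, run labels read at the cuts,
-- run lengths as differences of adjacent cuts (objective: alternative).

-- ===== PORT A =====
-- q.lstrip('-') / q.rstrip('-') are ported by hand as List.dropWhile / List.rdropWhile on
-- (· == '-') (exact: only their lengths are used).  String indexing reference_seq[pos] /
-- query_seq[pos] uses PySem.List.pyGetD (IndexError excluded by Pre_), cigar_ops[0] likewise.
-- Dict increments cigar_ops_values[ops] += 1 are Dict.modify with default 0 (exact: the key
-- is always one of the four keys present), and dict.update({}.fromkeys(d, 0)) is the fold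
-- re-inserting 0 at every existing key.

-- the body of A's first loop (appending cigar op letters)
def pvOpsStepA (rl ql : List Char) (acc : List String) (pos : Int) : List String :=
  let rbase := PySem.List.pyGetD rl pos ' '
  let qbase := PySem.List.pyGetD ql pos ' '
  if rbase == qbase then acc ++ ["M"]
  else if rbase == '-' then acc ++ ["I"]
  else if qbase == '-' then acc ++ ["D"]
  else if rbase != qbase then acc ++ ["X"]
  else acc

-- the body of A's second loop (manual run-length encoding; N = len(cigar_ops))
def pvBodyA (N : Int) (st : PySem.Dict String Int × List String × List Int × String)
    (p : Int × String) : PySem.Dict String Int × List String × List Int × String :=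
  let d := st.1; let ct := st.2.1; let cn := st.2.2.1; let cur := st.2.2.2
  let i := p.1; let ops := p.2
  let st' :=
    if ops == cur then (d.modify ops 0 (· + 1), ct, cn, cur)
    else
      let ct' := ct ++ [cur]
      let cn' := cn ++ [d.getD cur 0]
      let d' := (d.keys).foldl (fun dd k => dd.insert k (0 : Int)) d
      (d'.modify ops 0 (· + 1), ct', cn', ops)
  if ops == st'.2.2.2 && (N - 1 == i) then
    (st'.1, st'.2.1 ++ [st'.2.2.2], st'.2.2.1 ++ [st'.1.getD st'.2.2.2 0], st'.2.2.2)
  else st'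

def Generate_cigar (reference_seq : String) (query_seq : String) : List String × List Int × String :=
  let rl := reference_seq.toList
  let ql := query_seq.toList
  let query_lindex : Int := (ql.length : Int) - ((ql.dropWhile (· == '-')).length : Int)
  let query_rindex : Int := (ql.length : Int) - ((ql.rdropWhile (· == '-')).length : Int)
  let cigar_ops : List String :=
    (PySem.List.pyRange (0 + query_lindex) ((ql.length : Int) - query_rindex) 1).foldl
      (pvOpsStepA rl ql) []
  let d0 : PySem.Dict String Int :=
    ((((PySem.Dict.empty).insert "M" 0).insert "I" 0).insert "D" 0).insert "X" 0
  let current_ops : String := PySem.List.pyGetD cigar_ops 0 ""   -- cigar_ops[0]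
  let st := (PySem.List.enumerate cigar_ops 0).foldl (pvBodyA (cigar_ops.length : Int))
      (d0, ([] : List String), ([] : List Int), current_ops)
  (st.2.1, st.2.2.1,
    String.ofList (PySem.List.slice ql (some (0 + query_lindex)) (some ((ql.length : Int) - query_rindex))))

-- ===== PORT B =====
-- Source B's local op(i) is pvClassify applied at index i; zip(cuts, cuts[1:]) is
-- cuts.zip (slice cuts 1 none).
def pvClassify (rbase qbase : Char) : String :=
  if rbase == qbase then "M"
  else if rbase == '-' then "I"
  else if qbase == '-' then "D"
  else "X"

def Generate_cigar_alt (reference_seq : String) (query_seq : String) : List String × List Int × String :=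
  let rl := reference_seq.toList
  let ql := query_seq.toList
  let n : Int := (ql.length : Int)
  let lo : Int := n - ((ql.dropWhile (· == '-')).length : Int)
  let hi : Int := n - (n - ((ql.rdropWhile (· == '-')).length : Int))
  let op := fun (i : Int) => pvClassify (PySem.List.pyGetD rl i ' ') (PySem.List.pyGetD ql i ' ')
  let cuts : List Int :=
    ((PySem.List.pyRange lo hi 1).filter (fun i => i == lo || op i != op (i - 1))) ++ [hi]
  let pairs := cuts.zip (PySem.List.slice cuts (some 1) none)
  (pairs.map (fun p => op p.1), pairs.map (fun p => p.2 - p.1),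
    String.ofList (PySem.List.slice ql (some lo) (some hi)))

-- ===== PRECONDITION & SPEC =====
-- Pre_ excludes the inputs on which A raises: an empty trimmed window (query empty or all '-'),
-- where cigar_ops[0] is an IndexError, and a reference shorter than the window's right end,
-- where reference_seq[pos] is an IndexError.
def Pre_Generate_cigar (reference_seq : String) (query_seq : String) : Prop :=
  let ql := query_seq.toList
  let a := ql.length - (ql.dropWhile (· == '-')).length      -- leading '-' of the query
  let b := ql.length - (ql.rdropWhile (· == '-')).length     -- trailing '-' of the query
  a + b < ql.length ∧ ql.length - b ≤ reference_seq.toList.length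
instance (reference_seq : String) (query_seq : String) : Decidable (Pre_Generate_cigar reference_seq query_seq) := by unfold Pre_Generate_cigar; infer_instance
def pvWitness_Generate_cigar : String × String := ("ACGT-A", "AC-TAA")

def Spec_Generate_cigar (reference_seq : String) (query_seq : String) (out : List String × List Int × String) : Prop := out = Generate_cigar_alt reference_seq query_seq
instance (reference_seq : String) (query_seq : String) (out : List String × List Int × String) : Decidable (Spec_Generate_cigar reference_seq query_seq out) := by unfold Spec_Generate_cigar; infer_instance

-- ===== CLAIM (what is proved, stated in full; the proofs are below) =====
def Claim_equal_Generate_cigar : Prop := ∀ (reference_seq : String) (query_seq : String), Dom_Generate_cigar reference_seq query_seq → Pre_Generate_cigar reference_seq query_seq → Spec_Generate_cigar reference_seq query_seq (Generate_cigar reference_seq query_seq)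

-- ===== LEMMAS AND PROOFS =====

-- the four cigar op letters
def pvOPS : List String := ["M", "I", "D", "X"]

-- reference run-length encoding: pvRle c k l = RLE of (c^k ++ l), current run (c, k)
def pvRle (c : String) (k : Nat) : List String → List (String × Nat)
  | [] => [(c, k)]
  | x :: xs => if x = c then pvRle c (k + 1) xs else (c, k) :: pvRle x 1 xs

-- A's counter dict when the current run is c with count k (other keys 0)
def pvD (c : String) (k : Nat) : PySem.Dict String Int :=
  PySem.Dict.mk [("M", if c = "M" then (k : Int) else 0), ("I", if c = "I" then (k : Int) else 0),
                 ("D", if c = "D" then (k : Int) else 0), ("X", if c = "X" then (k : Int) else 0)]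

lemma pvClassify_mem (a b : Char) : pvClassify a b ∈ pvOPS := by
  unfold pvClassify pvOPS; split_ifs <;> simp

lemma pvD_zero (c : String) :
    pvD c 0 = PySem.Dict.mk [("M", 0), ("I", 0), ("D", 0), ("X", 0)] := by
  simp [pvD]

lemma pvD_modify (c : String) (hc : c ∈ pvOPS) (k : Nat) :
    (pvD c k).modify c 0 (· + 1) = pvD c (k + 1) := by
  fin_cases hc <;>
    simp [pvD, PySem.Dict.modify, PySem.Dict.getD, PySem.Dict.get?, PySem.Dict.insert] <;>
    push_cast <;> ring

lemma pvD_getD (c : String) (hc : c ∈ pvOPS) (k : Nat) :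
    (pvD c k).getD c 0 = (k : Int) := by
  fin_cases hc <;> simp [pvD, PySem.Dict.getD, PySem.Dict.get?]

lemma pvD_reset (c x : String) (hc : c ∈ pvOPS) (hx : x ∈ pvOPS) (k : Nat) :
    (((pvD c k).keys).foldl (fun dd kk => dd.insert kk (0 : Int)) (pvD c k)).modify x 0 (· + 1)
      = pvD x 1 := by
  fin_cases hc <;> fin_cases hx <;>
    simp [pvD, PySem.Dict.keys, PySem.Dict.modify, PySem.Dict.getD, PySem.Dict.get?,
      PySem.Dict.insert, List.foldl]

-- A's first loop builds exactly the classified op list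
lemma pvOpsA_eq (rl ql : List Char) (lo hi : Int) :
    (PySem.List.pyRange lo hi 1).foldl (pvOpsStepA rl ql) []
      = (PySem.List.pyRange lo hi 1).map
          (fun i => pvClassify (PySem.List.pyGetD rl i ' ') (PySem.List.pyGetD ql i ' ')) := by
  have h : pvOpsStepA rl ql = fun acc pos =>
      acc ++ [pvClassify (PySem.List.pyGetD rl pos ' ') (PySem.List.pyGetD ql pos ' ')] := by
    funext acc pos
    unfold pvOpsStepA pvClassify
    by_cases h1 : PySem.List.pyGetD rl pos ' ' == PySem.List.pyGetD ql pos ' '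
    · simp [h1]
    · simp only [h1, if_false]
      by_cases h2 : PySem.List.pyGetD rl pos ' ' == '-'
      · simp [h2]
      · simp only [h2, if_false]
        by_cases h3 : PySem.List.pyGetD ql pos ' ' == '-'
        · simp [h3]
        · simp [h3, bne, h1]
  rw [h, PySem.List.foldl_append_singleton_eq_map]; simp

-- evaluating A's loop body in its four cases
lemma pvBodyA_eq_last (N s : Int) (c : String) (hc : c ∈ pvOPS) (k : Nat)
    (t : List String) (ns : List Int) (hlast : N - 1 = s) :
    pvBodyA N (pvD c k, t, ns, c) (s, c)
      = (pvD c (k + 1), t ++ [c], ns ++ [((k + 1 : Nat) : Int)], c) := by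
  simp [pvBodyA, pvD_modify c hc k, pvD_getD c hc (k + 1), hlast]

lemma pvBodyA_eq_mid (N s : Int) (c : String) (hc : c ∈ pvOPS) (k : Nat)
    (t : List String) (ns : List Int) (hmid : N - 1 ≠ s) :
    pvBodyA N (pvD c k, t, ns, c) (s, c)
      = (pvD c (k + 1), t, ns, c) := by
  simp [pvBodyA, pvD_modify c hc k, hmid]

lemma pvBodyA_ne_last (N s : Int) (c x : String) (hxc : x ≠ c) (hc : c ∈ pvOPS) (hx : x ∈ pvOPS)
    (k : Nat) (t : List String) (ns : List Int) (hlast : N - 1 = s) :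
    pvBodyA N (pvD c k, t, ns, c) (s, x)
      = (pvD x 1, t ++ [c, x], ns ++ [(k : Int), 1], x) := by
  simp [pvBodyA, hxc, pvD_reset c x hc hx, pvD_getD c hc k, pvD_getD x hx 1, hlast]

lemma pvBodyA_ne_mid (N s : Int) (c x : String) (hxc : x ≠ c) (hc : c ∈ pvOPS) (hx : x ∈ pvOPS)
    (k : Nat) (t : List String) (ns : List Int) (hmid : N - 1 ≠ s) :
    pvBodyA N (pvD c k, t, ns, c) (s, x)
      = (pvD x 1, t ++ [c], ns ++ [(k : Int)], x) := by
  simp [pvBodyA, hxc, pvD_reset c x hc hx, pvD_getD c hc k, hmid]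

-- A's second loop computes pvRle (invariant over the enumerate fold)
lemma pvLoopA_spec (N : Int) :
    ∀ (l : List String) (s : Int) (c : String) (k : Nat) (t : List String) (ns : List Int),
      l ≠ [] → s + (l.length : Int) = N → c ∈ pvOPS → (∀ x ∈ l, x ∈ pvOPS) →
      ((PySem.List.enumerate l s).foldl (pvBodyA N) (pvD c k, t, ns, c)).2.1
          = t ++ (pvRle c k l).map (·.1)
        ∧ ((PySem.List.enumerate l s).foldl (pvBodyA N) (pvD c k, t, ns, c)).2.2.1
          = ns ++ (pvRle c k l).map (fun p => ((p.2 : Nat) : Int)) := by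
  intro l
  induction l with
  | nil => intro s c k t ns hne; exact absurd rfl hne
  | cons x l' ih =>
    intro s c k t ns _ hs hc hmem
    have hx : x ∈ pvOPS := hmem x (by simp)
    rw [PySem.List.enumerate_cons, List.foldl_cons]
    cases l' with
    | nil =>
      have hlast : N - 1 = s := by simp at hs; omega
      rw [PySem.List.enumerate_nil, List.foldl_nil]
      by_cases hxc : x = c
      · subst hxc
        rw [pvBodyA_eq_last N s x hx k t ns hlast]
        simp [pvRle]
      · rw [pvBodyA_ne_last N s c x hxc hc hx k t ns hlast]
        simp [pvRle, hxc]
    | cons y l'' =>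
      have hmid : N - 1 ≠ s := by simp at hs; omega
      by_cases hxc : x = c
      · subst hxc
        rw [pvBodyA_eq_mid N s x hx k t ns hmid]
        have := ih (s + 1) x (k + 1) t ns (by simp) (by simp at hs ⊢; omega) hx
          (fun z hz => hmem z (by simp [hz]))
        simpa [pvRle] using this
      · rw [pvBodyA_ne_mid N s c x hxc hc hx k t ns hmid]
        have := ih (s + 1) x 1 (t ++ [c]) (ns ++ [(k : Int)]) (by simp)
          (by simp at hs ⊢; omega) hx (fun z hz => hmem z (by simp [hz]))
        simpa [pvRle, hxc] using this

-- B's change-point fold: the generalized cut-list invariant.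
-- State: the current run started at s - k and carries letter c (= f (s - k) = f (s - 1));
-- the remaining range is s .. s + n.  Then the zip-of-adjacent-cuts maps compute pvRle.
lemma pvCutsB_spec (f : Int → String) (lo : Int) :
    ∀ (n : Nat) (s : Int) (c : String) (k : Nat), lo < s →
      f (s - (k : Int)) = c → f (s - 1) = c →
      (let cuts : List Int := (s - (k : Int)) ::
          ((PySem.List.pyRange s (s + (n : Int)) 1).filter
            (fun i => i == lo || f i != f (i - 1))) ++ [s + (n : Int)]
       let pairs := cuts.zip cuts.tail
       pairs.map (fun p => f p.1) = (pvRle c k ((PySem.List.pyRange s (s + (n : Int)) 1).map f)).map (·.1)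
         ∧ pairs.map (fun p => p.2 - p.1)
             = (pvRle c k ((PySem.List.pyRange s (s + (n : Int)) 1).map f)).map
                 (fun q => ((q.2 : Nat) : Int))) := by
  intro n
  induction n with
  | zero =>
    intro s c k _ hfk _
    rw [PySem.List.pyRange_one_eq_nil (by omega)]
    simp [pvRle, hfk]
  | succ m ih =>
    intro s c k hlos hfk hf1
    simp only
    have hE2 : s + ((m + 1 : Nat) : Int) = (s + 1) + ((m : Nat) : Int) := by push_cast; ring
    rw [hE2, PySem.List.pyRange_one_cons (show s < (s + 1) + ((m : Nat) : Int) by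
      have : (0 : Int) ≤ ((m : Nat) : Int) := Int.natCast_nonneg m
      omega)]
    by_cases hsc : f s = c
    · -- no change point at s: the filter drops s, the run extends to k + 1
      have hpred : ((s == lo || f s != f (s - 1))) = false := by
        simp [hf1, hsc]
        omega
      rw [List.filter_cons, hpred]
      simp only [Bool.false_eq_true, if_false, List.map_cons]
      have hrle : pvRle c k (f s :: (PySem.List.pyRange (s + 1) ((s + 1) + ((m : Nat) : Int)) 1).map f)
          = pvRle c (k + 1) ((PySem.List.pyRange (s + 1) ((s + 1) + ((m : Nat) : Int)) 1).map f) := by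
        simp [pvRle, hsc]
      rw [hrle]
      have IH := ih (s + 1) c (k + 1) (by omega)
        (by rw [show s + 1 - ((k + 1 : Nat) : Int) = s - (k : Int) by push_cast; ring]; exact hfk)
        (by simpa using hsc)
      simp only at IH
      rw [show s + 1 - ((k + 1 : Nat) : Int) = s - (k : Int) by push_cast; ring] at IH
      exact IH
    · -- change point at s: the filter keeps s; run (c, k) closes and (f s, 1) starts
      have hpred : ((s == lo || f s != f (s - 1))) = true := by
        simp [hf1]
        exact Or.inr hsc
      rw [List.filter_cons, hpred, if_pos rfl]
      have IH := ih (s + 1) (f s) 1 (by omega) (by norm_num) (by norm_num)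
      simp only at IH
      rw [show s + 1 - ((1 : Nat) : Int) = s by push_cast; ring] at IH
      obtain ⟨h1, h2⟩ := IH
      simp only [List.map_cons, List.cons_append, List.zip_cons_cons, List.tail_cons]
      have hrle : pvRle c k (f s :: (PySem.List.pyRange (s + 1) ((s + 1) + ((m : Nat) : Int)) 1).map f)
          = (c, k) :: pvRle (f s) 1 ((PySem.List.pyRange (s + 1) ((s + 1) + ((m : Nat) : Int)) 1).map f) := by
        simp [pvRle, hsc]
      rw [hrle]
      refine ⟨?_, ?_⟩
      · simp only [List.map_cons, hfk]
        exact congrArg _ h1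
      · simp only [List.map_cons]
        rw [show s - (s - (k : Int)) = ((k : Nat) : Int) by omega]
        exact congrArg _ h2

-- the two ports agree on the trimmed window once it is nonempty
lemma pvMain (rl ql : List Char) (lo E : Int) (hlt : lo < E) :
    (let f := fun (i : Int) => pvClassify (PySem.List.pyGetD rl i ' ') (PySem.List.pyGetD ql i ' ')
     let cigar_ops := (PySem.List.pyRange lo E 1).foldl (pvOpsStepA rl ql) []
     let stA := (PySem.List.enumerate cigar_ops 0).foldl (pvBodyA (cigar_ops.length : Int))
        (((((PySem.Dict.empty).insert "M" 0).insert "I" 0).insert "D" 0).insert "X" 0,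
          ([] : List String), ([] : List Int), PySem.List.pyGetD cigar_ops 0 "")
     let cuts : List Int := ((PySem.List.pyRange lo E 1).filter
        (fun i => i == lo || f i != f (i - 1))) ++ [E]
     let pairs := cuts.zip (PySem.List.slice cuts (some 1) none)
     stA.2.1 = pairs.map (fun p => f p.1) ∧ stA.2.2.1 = pairs.map (fun p => p.2 - p.1)) := by
  simp only [PySem.List.slice_from_one]
  set f := fun (i : Int) => pvClassify (PySem.List.pyGetD rl i ' ') (PySem.List.pyGetD ql i ' ')
    with hf
  rw [pvOpsA_eq rl ql lo E]
  have hr : PySem.List.pyRange lo E 1 = lo :: PySem.List.pyRange (lo + 1) E 1 :=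
    PySem.List.pyRange_one_cons hlt
  set rest : List String := (PySem.List.pyRange (lo + 1) E 1).map f with hrest
  have hops : (PySem.List.pyRange lo E 1).map f = f lo :: rest := by rw [hr, List.map_cons]
  rw [hops]
  have hd0 : ((((PySem.Dict.empty).insert "M" 0).insert "I" 0).insert "D" 0).insert "X" (0 : Int)
      = pvD (f lo) 0 := by rw [pvD_zero]; decide
  have hhead : PySem.List.pyGetD (f lo :: rest) 0 "" = f lo := PySem.List.pyGetD_zero_cons _ _ _
  rw [hd0, hhead]
  have hmem : ∀ x ∈ f lo :: rest, x ∈ pvOPS := by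
    intro x hx
    rcases List.mem_cons.mp hx with h | h
    · subst h; exact pvClassify_mem _ _
    · rcases List.mem_map.mp (hrest ▸ h) with ⟨i, _, hi⟩
      subst hi; exact pvClassify_mem _ _
  have hloop := pvLoopA_spec ((f lo :: rest).length : Int) (f lo :: rest) 0 (f lo) 0 [] []
    (by simp) (by simp) (pvClassify_mem _ _) hmem
  have hrle0 : pvRle (f lo) 0 (f lo :: rest) = pvRle (f lo) 1 rest := by simp [pvRle]
  -- B's cuts: the head lo is kept by the filter, then pvCutsB_spec applies from lo + 1
  have hB := pvCutsB_spec f lo ((E - lo - 1).toNat) (lo + 1) (f lo) 1 (by omega)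
    (by norm_num) (by norm_num)
  simp only at hB
  rw [show lo + 1 - ((1 : Nat) : Int) = lo by push_cast; ring] at hB
  rw [show (lo + 1) + (((E - lo - 1).toNat : Nat) : Int) = E by omega] at hB
  have hflt : (PySem.List.pyRange lo E 1).filter (fun i => i == lo || f i != f (i - 1))
      = lo :: (PySem.List.pyRange (lo + 1) E 1).filter (fun i => i == lo || f i != f (i - 1)) := by
    rw [hr, List.filter_cons]
    simp
  rw [hflt]
  refine ⟨?_, ?_⟩
  · rw [hloop.1, hrle0]
    simp only [List.nil_append, List.cons_append] at hB ⊢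
    simp only [hf] at hB ⊢
    exact hB.1.symm
  · rw [hloop.2, hrle0]
    simp only [List.nil_append, List.cons_append] at hB ⊢
    simp only [hf] at hB ⊢
    exact hB.2.symm

-- ===== VERDICT (by name: the statement is the Claim_ definition above) =====
theorem Generate_cigar_spec : Claim_equal_Generate_cigar := by
  intro r q _ hpre
  unfold Pre_Generate_cigar at hpre
  obtain ⟨h1, h2⟩ := hpre
  have hdw := List.length_dropWhile_le (fun c => c == '-') q.toList
  have hrd : (List.rdropWhile (fun c => c == '-') q.toList).length ≤ q.toList.length := by
    rw [List.rdropWhile]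
    simpa using List.length_dropWhile_le (fun c => c == '-') q.toList.reverse
  have hlt : ((q.toList.length : Int) - ((q.toList.dropWhile (· == '-')).length : Int))
      < (q.toList.length : Int)
        - ((q.toList.length : Int) - ((q.toList.rdropWhile (· == '-')).length : Int)) := by
    omega
  unfold Spec_Generate_cigar Generate_cigar Generate_cigar_alt
  simp only [zero_add]
  have hM := pvMain r.toList q.toList
    ((q.toList.length : Int) - ((q.toList.dropWhile (· == '-')).length : Int))
    ((q.toList.length : Int)
      - ((q.toList.length : Int) - ((q.toList.rdropWhile (· == '-')).length : Int))) hlt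
  simp only at hM
  rw [Prod.mk.injEq, Prod.mk.injEq]
  exact ⟨hM.1, hM.2, rfl⟩
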